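-- pv_equiv track=rewrite | github.com/birb97/RansomMonitor | processors/validators.py | validate_domain
-- ===== SOURCE A (Python) =====
-- def validate_domain(domain):
--     """
--     Validate if a string is a valid domain name.
--
--     Args:
--         domain (str): String to validate as domain
--
--     Returns:
--         bool: True if valid domain, False otherwise
--     """
--     if not domain:
--         return False
--
--     # Simple validation - more complex validation would use regex
--     parts = domain.split('.')
--
--     # Must have at least two parts and all parts must be valid
--     if len(parts) < 2:
--         return False
--
--     for part in parts:
--         # Each part must contain at least one character and only valid chars
--         if not part or not all(c.isalnum() or c == '-' for c in part):
--             return False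
--
--     # Top level domain can't be all numeric
--     if parts[-1].isdigit():
--         return False
--
--     return True
-- ===== SOURCE B (Python) =====
-- def validate_domain(domain):
--     """Single left-to-right scan instead of split + re-scan passes."""
--     if not domain:
--         return False
--
--     seg_len = 0          # length of current dot-separated segment
--     seg_digits = True    # current segment is entirely digits so far
--     segs = 0             # number of finished segments
--
--     for c in domain:
--         if c == '.':
--             if seg_len == 0:
--                 return False
--             segs += 1
--             seg_len = 0
--             seg_digits = True
--         else:
--             if not (c.isalnum() or c == '-'):
--                 return False
--             seg_digits = seg_digits and c.isdigit()
--             seg_len += 1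
--
--     if seg_len == 0:
--         return False
--     segs += 1
--     if segs < 2:
--         return False
--     if seg_digits:
--         return False
--     return True
-- ===== Notes on version B (the rewrite author's own statement) =====
-- stated objective: alternative
-- what changed: Replaced split('.') into a parts list followed by three further passes (length check, per-part character scan, last-part all-digit check) by one left-to-right scan over the characters maintaining segment length, a segment all-digits flag and a segment count.
import Mathlib
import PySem

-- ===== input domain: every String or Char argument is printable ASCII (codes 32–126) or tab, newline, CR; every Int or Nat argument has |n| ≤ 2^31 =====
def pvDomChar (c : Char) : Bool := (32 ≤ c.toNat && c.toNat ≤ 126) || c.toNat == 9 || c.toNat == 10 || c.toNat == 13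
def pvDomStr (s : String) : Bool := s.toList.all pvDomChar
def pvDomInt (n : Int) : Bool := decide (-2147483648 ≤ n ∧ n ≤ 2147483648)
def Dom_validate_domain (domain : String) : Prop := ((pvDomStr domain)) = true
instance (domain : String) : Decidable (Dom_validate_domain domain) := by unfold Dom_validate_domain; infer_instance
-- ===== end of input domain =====

-- B replaces A's split-into-parts plus three further passes (length check, per-part scan,
-- last-part digit check) by a single left-to-right scan over the characters; same return value.

-- ===== PORT A =====
-- the 'for part in parts' loop of A (early return False on the first bad part)
def validate_domain_parts_ok : List (List Char) → Bool
  | [] => true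
  | part :: rest =>
      if part.isEmpty || !(part.all (fun c => PySem.Chars.isalnum c || c == '-')) then false
      else validate_domain_parts_ok rest

def validate_domain (domain : String) : Bool :=
  if domain.toList.isEmpty then false
  else
    let parts := PySem.Chars.splitOn domain.toList ['.']
    if parts.length < 2 then false
    else if !(validate_domain_parts_ok parts) then false
    else if PySem.Chars.strIsdigit (PySem.List.pyGetD parts (-1) []) then false
    else true

-- ===== PORT B =====
-- the single-pass loop of Source B: state = (current segment length, current segment all-digits
-- so far, number of finished segments); early return False on a bad char or an empty segment
def validate_domain_scan : List Char → Nat → Bool → Nat → Bool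
  | [], segLen, segDig, segs =>
      if segLen == 0 then false
      else if segs + 1 < 2 then false
      else !segDig
  | c :: rest, segLen, segDig, segs =>
      if c == '.' then
        if segLen == 0 then false
        else validate_domain_scan rest 0 true (segs + 1)
      else if !(PySem.Chars.isalnum c || c == '-') then false
      else validate_domain_scan rest (segLen + 1) (segDig && PySem.Chars.isdigit c) segs

def validate_domain_alt (domain : String) : Bool :=
  if domain.toList.isEmpty then false
  else validate_domain_scan domain.toList 0 true 0

-- ===== PRECONDITION & SPEC =====
def Spec_validate_domain (domain : String) (out : Bool) : Prop := out = validate_domain_alt domain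
instance (domain : String) (out : Bool) : Decidable (Spec_validate_domain domain out) := by unfold Spec_validate_domain; infer_instance

-- ===== CLAIM (what is proved, stated in full; the proofs are below) =====
def Claim_equal_validate_domain : Prop := ∀ (domain : String), Dom_validate_domain domain → Spec_validate_domain domain (validate_domain domain)

-- ===== LEMMAS AND PROOFS =====

-- semantics of "validate the remaining parts, with `segs` dot-terminated segments already done"
def pvTailSem (segs : Nat) : List (List Char) → Bool
  | [] => false
  | [p] =>
      if p.isEmpty || !(p.all (fun c => PySem.Chars.isalnum c || c == '-')) then false
      else if segs + 1 < 2 then false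
      else !(PySem.Chars.strIsdigit p)
  | p :: q :: rest =>
      if p.isEmpty || !(p.all (fun c => PySem.Chars.isalnum c || c == '-')) then false
      else pvTailSem (segs + 1) (q :: rest)

lemma go_zero (l cur : List Char) (acc : List (List Char)) :
    PySem.Chars.splitOn.go ['.'] 0 l cur acc = ((cur.reverse ++ l) :: acc).reverse := by
  simp [PySem.Chars.splitOn.go]

lemma go_nil (fuel : Nat) (cur : List Char) (acc : List (List Char)) :
    PySem.Chars.splitOn.go ['.'] (fuel+1) [] cur acc = (cur.reverse :: acc).reverse := by
  simp [PySem.Chars.splitOn.go]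

lemma go_dot (fuel : Nat) (rest cur : List Char) (acc : List (List Char)) :
    PySem.Chars.splitOn.go ['.'] (fuel+1) ('.' :: rest) cur acc
      = PySem.Chars.splitOn.go ['.'] fuel rest [] (cur.reverse :: acc) := by
  simp [PySem.Chars.splitOn.go, List.isPrefixOf]

lemma go_char (fuel : Nat) (c : Char) (rest cur : List Char) (acc : List (List Char)) (hc : c ≠ '.') :
    PySem.Chars.splitOn.go ['.'] (fuel+1) (c :: rest) cur acc
      = PySem.Chars.splitOn.go ['.'] fuel rest (c :: cur) acc := by
  simp [PySem.Chars.splitOn.go, List.isPrefixOf]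
  exact fun h => absurd h.symm hc

lemma go_acc (fuel : Nat) (l cur : List Char) (acc : List (List Char)) :
    PySem.Chars.splitOn.go ['.'] fuel l cur acc
      = acc.reverse ++ PySem.Chars.splitOn.go ['.'] fuel l cur [] := by
  induction fuel generalizing l cur acc with
  | zero => simp [go_zero]
  | succ fuel ih =>
    cases l with
    | nil => simp [go_nil]
    | cons c rest =>
      by_cases hc : c = '.'
      · subst hc
        rw [go_dot, go_dot, ih, ih _ _ [cur.reverse]]
        simp
      · rw [go_char _ _ _ _ _ hc, go_char _ _ _ _ _ hc, ih]

lemma go_ne_nil (fuel : Nat) (l cur : List Char) (acc : List (List Char)) :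
    PySem.Chars.splitOn.go ['.'] fuel l cur acc ≠ [] := by
  induction fuel generalizing l cur acc with
  | zero => simp [go_zero]
  | succ fuel ih =>
    cases l with
    | nil => simp [go_nil]
    | cons c rest =>
      by_cases hc : c = '.'
      · subst hc; rw [go_dot]; exact ih _ _ _
      · rw [go_char _ _ _ _ _ hc]; exact ih _ _ _

lemma splitOn_ne_nil (s : List Char) : PySem.Chars.splitOn s ['.'] ≠ [] := by
  simp only [PySem.Chars.splitOn]
  exact go_ne_nil _ _ _ _

lemma splitOn_cons_dot (s : List Char) :
    PySem.Chars.splitOn ('.' :: s) ['.'] = [] :: PySem.Chars.splitOn s ['.'] := by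
  simp only [PySem.Chars.splitOn, List.length_cons]
  rw [go_dot, go_acc]
  simp

lemma go_cur (fuel : Nat) (s cur : List Char) (hf : s.length ≤ fuel) :
    PySem.Chars.splitOn.go ['.'] fuel s cur []
      = (cur.reverse ++ (PySem.Chars.splitOn.go ['.'] fuel s [] []).headI)
        :: (PySem.Chars.splitOn.go ['.'] fuel s [] []).tail := by
  induction fuel generalizing s cur with
  | zero =>
    cases s with
    | nil => simp [go_zero]
    | cons c rest => simp at hf
  | succ fuel ih =>
    cases s with
    | nil => simp [go_nil]
    | cons c rest =>
      simp only [List.length_cons, Nat.add_le_add_iff_right] at hf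
      by_cases hc : c = '.'
      · subst hc
        rw [go_dot, go_dot, go_acc, go_acc _ _ _ [([] : List Char).reverse]]
        simp
      · rw [go_char _ _ _ _ _ hc, go_char _ _ _ _ _ hc, ih _ _ hf, ih _ [c] hf]
        simp

lemma splitOn_cons_ne (c : Char) (s : List Char) (hc : c ≠ '.') :
    PySem.Chars.splitOn (c :: s) ['.']
      = (c :: (PySem.Chars.splitOn s ['.']).headI) :: (PySem.Chars.splitOn s ['.']).tail := by
  simp only [PySem.Chars.splitOn, List.length_cons]
  rw [go_char _ _ _ _ _ hc, go_cur _ _ _ (by omega)]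
  simp

lemma tailSem_bad (segs : Nat) (p : List Char) (t : List (List Char))
    (h : p.all (fun c => PySem.Chars.isalnum c || c == '-') = false) :
    pvTailSem segs (p :: t) = false := by
  cases t <;> simp [pvTailSem, h]

lemma scan_eq (s : List Char) (seg : List Char) (segs : Nat)
    (hgood : seg.all (fun c => PySem.Chars.isalnum c || c == '-') = true) :
    validate_domain_scan s seg.length (seg.all PySem.Chars.isdigit) segs
      = pvTailSem segs
          ((seg ++ (PySem.Chars.splitOn s ['.']).headI) :: (PySem.Chars.splitOn s ['.']).tail) := by
  induction s generalizing seg segs with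
  | nil =>
    have h0 : PySem.Chars.splitOn [] ['.'] = [[]] := by decide
    rw [h0]
    cases seg with
    | nil => simp [validate_domain_scan, pvTailSem]
    | cons a as => simp [validate_domain_scan, pvTailSem, PySem.Chars.strIsdigit, hgood]
  | cons c rest ih =>
    by_cases hc : c = '.'
    · subst hc
      rw [splitOn_cons_dot]
      obtain ⟨q, t, hqt⟩ := List.exists_cons_of_ne_nil (splitOn_ne_nil rest)
      have ihe := ih [] (segs + 1) (by simp)
      rw [hqt] at ihe ⊢
      simp only [List.length_nil, List.all_nil, List.nil_append, List.headI_cons,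
        List.tail_cons] at ihe
      cases seg with
      | nil => simp [validate_domain_scan, pvTailSem]
      | cons a as => simp [validate_domain_scan, pvTailSem, hgood, ihe]
    · rw [splitOn_cons_ne _ _ hc]
      have hcB : (c == '.') = false := by simp [hc]
      by_cases hg : (PySem.Chars.isalnum c || c == '-') = true
      · have hgood' : (seg ++ [c]).all (fun c => PySem.Chars.isalnum c || c == '-') = true := by
          simp [List.all_append, hgood, hg]
        have ihe := ih (seg ++ [c]) segs hgood'
        simp only [List.length_append, List.length_cons, List.length_nil, List.all_append,
          List.all_cons, List.all_nil, List.append_assoc, List.singleton_append,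
          Nat.zero_add, Bool.and_true] at ihe
        simp [validate_domain_scan, hcB, hg, ihe]
      · have hgB : (PySem.Chars.isalnum c || c == '-') = false := by
          simpa using hg
        rw [tailSem_bad]
        · simp [validate_domain_scan, hcB, hgB]
        · simp [List.all_append, hgB]

lemma tailSem_A (parts : List (List Char)) (segs : Nat) (h : parts ≠ []) :
    pvTailSem segs parts
      = if parts.length + segs < 2 then false
        else if !(validate_domain_parts_ok parts) then false
        else if PySem.Chars.strIsdigit (parts.getLast h) then false
        else true := by
  induction parts generalizing segs with
  | nil => exact absurd rfl h
  | cons p t ih =>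
    cases t with
    | nil =>
      simp only [pvTailSem, validate_domain_parts_ok, List.getLast_singleton, List.length_cons,
        List.length_nil]
      split_ifs <;> simp_all
    | cons q r =>
      have hne : q :: r ≠ [] := by simp
      rw [List.getLast_cons hne]
      by_cases hb : (p.isEmpty || !(p.all (fun c => PySem.Chars.isalnum c || c == '-'))) = true
      · have hL : pvTailSem segs (p :: q :: r) = false := by
          simp only [pvTailSem]; rw [if_pos hb]
        have hpo : validate_domain_parts_ok (p :: q :: r) = false := by
          simp only [validate_domain_parts_ok]; rw [if_pos hb]
        rw [hL, hpo]
        split_ifs <;> simp_all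
      · have hL : pvTailSem segs (p :: q :: r) = pvTailSem (segs + 1) (q :: r) := by
          simp only [pvTailSem]; rw [if_neg hb]
        have hpo : validate_domain_parts_ok (p :: q :: r) = validate_domain_parts_ok (q :: r) := by
          simp only [validate_domain_parts_ok]; rw [if_neg hb]
        rw [hL, ih (segs + 1) hne, hpo]
        have h2 : ¬((q :: r).length + (segs + 1) < 2) := by simp; omega
        have h3 : ¬((p :: q :: r).length + segs < 2) := by simp; omega
        rw [if_neg h2, if_neg h3]

-- ===== VERDICT (by name: the statement is the Claim_ definition above) =====
theorem validate_domain_spec : Claim_equal_validate_domain := by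
  intro domain _
  unfold Spec_validate_domain
  unfold validate_domain validate_domain_alt
  by_cases he : domain.toList.isEmpty
  · rw [if_pos he, if_pos he]
  · rw [if_neg he, if_neg he]
    obtain ⟨p, t, hpt⟩ := List.exists_cons_of_ne_nil (splitOn_ne_nil domain.toList)
    have hscan := scan_eq domain.toList [] 0 (by simp)
    rw [hpt] at hscan
    simp only [List.length_nil, List.all_nil, List.nil_append, List.headI_cons,
      List.tail_cons] at hscan
    rw [hscan, tailSem_A (p :: t) 0 (by simp)]
    have hlast : PySem.List.pyGetD (p :: t) (-1) ([] : List Char) = (p :: t).getLast (by simp) := by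
      rw [PySem.List.pyGetD_neg_ofNat _ 1 _ (by omega) (by simp)]
      rw [List.getLast_eq_getElem]
    simp only [hpt, hlast, Nat.add_zero]
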